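-- pv_equiv track=rewrite | github.com/0xjuju/sample-django-tracker | wallets/update_wallets.py | filter_transactions
-- ===== SOURCE A (Python) =====
-- from collections import defaultdict, Counter
--
-- def filter_transactions(buyers: dict[str, list], sellers: dict[str, list]):
--     # Loop through buyers and sellers to create list of transaction excluding ones likely done by bots
--     filtered_transactions = list()
--     for buyer, values in buyers.items():
--
--         # Whitelist address since FrontRunner bots should always have sales transactions
--         # Assumes token with high enough volume that buy and sale happens within this range of blocks
--         # possible to miss bots within transactions on front or end of block
--         if sellers.get(buyer) is None:
--             for value in values:
--                 filtered_transactions.append((buyer, value[1], value[2]))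
--         else:
--             for value in values:
--                 # Assumption that most real buyers will not have more than 5 buy events in a single block
--                 if value[0] == 1:
--                     filtered_transactions.append((buyer, value[1], value[2]))
--
--     # Number of tx for each account
--     tx_count = Counter(i[0] for i in filtered_transactions)
--     # further filter tx for accounts with less than 4
--     filtered_transactions = [i for i in filtered_transactions if tx_count[i[0]] == 1]
--     return filtered_transactions
-- ===== SOURCE B (Python) =====
-- def filter_transactions(buyers: dict[str, list], sellers: dict[str, list]):
--     # One grouped pass: a buyer's global tx count equals its per-buyer eligible count
--     # (dict keys are unique), so keep a buyer's tuples iff it has exactly one.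
--     result = []
--     for buyer, values in buyers.items():
--         if buyer in sellers:
--             group = [(buyer, v[1], v[2]) for v in values if v[0] == 1]
--         else:
--             group = [(buyer, v[1], v[2]) for v in values]
--         if len(group) == 1:
--             result.extend(group)
--     return result
-- ===== Notes on version B (the rewrite author's own statement) =====
-- stated objective: simpler
-- what changed: Replaces the flat-list build + global Counter + second filtering pass with a single grouped pass per buyer: since dict keys are unique, a buyer's global tx count equals the size of its own eligible group, so each buyer's group is kept iff it has exactly one element. Pre_ only requires the buyers association list to have pairwise-distinct keys, which every Python dict argument satisfies.
import Mathlib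
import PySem

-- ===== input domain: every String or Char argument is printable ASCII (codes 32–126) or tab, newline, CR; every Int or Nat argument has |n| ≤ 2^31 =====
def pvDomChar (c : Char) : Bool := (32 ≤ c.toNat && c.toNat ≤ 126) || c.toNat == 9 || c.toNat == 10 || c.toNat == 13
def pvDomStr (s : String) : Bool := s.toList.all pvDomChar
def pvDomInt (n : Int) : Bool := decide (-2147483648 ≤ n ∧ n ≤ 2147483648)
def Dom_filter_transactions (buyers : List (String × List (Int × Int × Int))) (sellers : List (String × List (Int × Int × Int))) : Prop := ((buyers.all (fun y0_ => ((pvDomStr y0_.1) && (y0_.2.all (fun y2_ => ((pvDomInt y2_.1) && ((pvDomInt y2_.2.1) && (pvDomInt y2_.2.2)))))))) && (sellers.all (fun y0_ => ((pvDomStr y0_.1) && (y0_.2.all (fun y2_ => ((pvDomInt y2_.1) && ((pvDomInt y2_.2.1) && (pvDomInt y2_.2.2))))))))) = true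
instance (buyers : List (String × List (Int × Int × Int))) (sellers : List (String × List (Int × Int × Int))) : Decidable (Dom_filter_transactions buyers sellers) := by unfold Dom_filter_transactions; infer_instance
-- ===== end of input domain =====

-- B replaces A's flat list + global Counter + second filter by one grouped pass per buyer
-- (per-buyer eligible-group size equals the global count because dict keys are unique): simpler.


-- ===== PORT A =====
def filter_transactions (buyers : List (String × List (Int × Int × Int))) (sellers : List (String × List (Int × Int × Int))) : List (String × Int × Int) :=
  let ft : List (String × Int × Int) :=
    buyers.foldl (fun acc bv =>
      match (PySem.Dict.mk sellers).get? bv.1 with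
      | none => bv.2.foldl (fun acc v => acc ++ [(bv.1, v.2.1, v.2.2)]) acc
      | some _ => bv.2.foldl (fun acc v => if v.1 == 1 then acc ++ [(bv.1, v.2.1, v.2.2)] else acc) acc) []
  let tx_count : PySem.Dict String Int := PySem.Dict.counter (ft.map (fun i => i.1))
  ft.filter (fun i => tx_count.getD i.1 0 == 1)

-- ===== PORT B =====
def filter_transactions_alt (buyers : List (String × List (Int × Int × Int))) (sellers : List (String × List (Int × Int × Int))) : List (String × Int × Int) :=
  buyers.foldl (fun acc bv =>
    let group : List (String × Int × Int) :=
      if (PySem.Dict.mk sellers).contains bv.1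
      then (bv.2.filter (fun v => v.1 == 1)).map (fun v => (bv.1, v.2.1, v.2.2))
      else bv.2.map (fun v => (bv.1, v.2.1, v.2.2))
    if group.length == 1 then acc ++ group else acc) []

-- ===== PRECONDITION & SPEC =====
-- Pre_ excludes only association lists whose buyer keys repeat: a Python dict argument can never
-- have duplicate keys, so every input the Python A accepts is admitted.
def Pre_filter_transactions (buyers : List (String × List (Int × Int × Int))) (sellers : List (String × List (Int × Int × Int))) : Prop :=
  (buyers.map Prod.fst).Nodup
instance (buyers : List (String × List (Int × Int × Int))) (sellers : List (String × List (Int × Int × Int))) : Decidable (Pre_filter_transactions buyers sellers) := by unfold Pre_filter_transactions; infer_instance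
def pvWitness_filter_transactions : (List (String × List (Int × Int × Int))) × (List (String × List (Int × Int × Int))) :=
  ([("a", [(1, 2, 3)]), ("b", [(0, 4, 5), (1, 6, 7)])], [("b", [])])
def Spec_filter_transactions (buyers : List (String × List (Int × Int × Int))) (sellers : List (String × List (Int × Int × Int))) (out : List (String × Int × Int)) : Prop := out = filter_transactions_alt buyers sellers
instance (buyers : List (String × List (Int × Int × Int))) (sellers : List (String × List (Int × Int × Int))) (out : List (String × Int × Int)) : Decidable (Spec_filter_transactions buyers sellers out) := by unfold Spec_filter_transactions; infer_instance

-- ===== CLAIM (what is proved, stated in full; the proofs are below) =====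
def Claim_equal_filter_transactions : Prop := ∀ (buyers : List (String × List (Int × Int × Int))) (sellers : List (String × List (Int × Int × Int))), Dom_filter_transactions buyers sellers → Pre_filter_transactions buyers sellers → Spec_filter_transactions buyers sellers (filter_transactions buyers sellers)

-- ===== LEMMAS AND PROOFS =====

-- the eligible group of one buyer (the value both ports' per-buyer work reduces to)
def pvGroup (sellers : List (String × List (Int × Int × Int))) (b : String) (vs : List (Int × Int × Int)) : List (String × Int × Int) :=
  if (PySem.Dict.mk sellers).contains b
  then (vs.filter (fun v => v.1 == 1)).map (fun v => (b, v.2.1, v.2.2))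
  else vs.map (fun v => (b, v.2.1, v.2.2))

theorem pvGroup_fst (sellers) (b : String) (vs) :
    ∀ x ∈ pvGroup sellers b vs, x.1 = b := by
  intro x hx
  unfold pvGroup at hx
  split at hx <;> simp only [List.mem_map] at hx <;> obtain ⟨v, _, rfl⟩ := hx <;> rfl

theorem count_flatMap (buyers : List (String × List (Int × Int × Int)))
    (G : (String × List (Int × Int × Int)) → List (String × Int × Int))
    (hfst : ∀ bv ∈ buyers, ∀ x ∈ G bv, x.1 = bv.1)
    (hnd : (buyers.map Prod.fst).Nodup)
    (bv0 : String × List (Int × Int × Int)) (hb : bv0 ∈ buyers) :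
    ((buyers.flatMap G).map Prod.fst).count bv0.1 = (G bv0).length := by
  induction buyers with
  | nil => cases hb
  | cons hd tl ih =>
    simp only [List.flatMap_cons, List.map_append, List.count_append]
    simp only [List.map_cons, List.nodup_cons] at hnd
    rcases List.mem_cons.1 hb with rfl | hb'
    · have h1 : ((G bv0).map Prod.fst).count bv0.1 = ((G bv0).map Prod.fst).length := by
        apply List.count_eq_length.2
        intro a ha
        simp only [List.mem_map] at ha
        obtain ⟨x, hx, rfl⟩ := ha
        exact (hfst bv0 (List.mem_cons_self) x hx).symm
      have h2 : ((tl.flatMap G).map Prod.fst).count bv0.1 = 0 := by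
        apply List.count_eq_zero.2
        intro hmem
        simp only [List.mem_map, List.mem_flatMap] at hmem
        obtain ⟨x, ⟨bv, hbv, hxg⟩, hfx⟩ := hmem
        exact hnd.1 (by
          rw [← hfx, hfst bv (List.mem_cons_of_mem _ hbv) x hxg]
          exact List.mem_map_of_mem hbv)
      rw [h1, h2, List.length_map]
      omega
    · have h1 : ((G hd).map Prod.fst).count bv0.1 = 0 := by
        apply List.count_eq_zero.2
        intro hmem
        simp only [List.mem_map] at hmem
        obtain ⟨x, hx, hfx⟩ := hmem
        have heq : bv0.1 = hd.1 := by rw [← hfx, hfst hd List.mem_cons_self x hx]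
        exact hnd.1 (heq ▸ List.mem_map_of_mem hb')
      rw [h1, ih (fun bv h => hfst bv (List.mem_cons_of_mem _ h)) hnd.2 hb']
      omega

theorem filter_flatMap_count (buyers : List (String × List (Int × Int × Int)))
    (G : (String × List (Int × Int × Int)) → List (String × Int × Int))
    (hfst : ∀ bv ∈ buyers, ∀ x ∈ G bv, x.1 = bv.1)
    (hnd : (buyers.map Prod.fst).Nodup) :
    (buyers.flatMap G).filter
        (fun i => (((buyers.flatMap G).map Prod.fst).count i.1 : Int) == 1)
      = buyers.flatMap (fun bv => if (G bv).length == 1 then G bv else []) := by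
  rw [List.filter_flatMap]
  apply List.flatMap_congr
  intro bv hbv
  have hc := count_flatMap buyers G hfst hnd bv hbv
  by_cases hl : (G bv).length = 1
  · simp only [hl, beq_self_eq_true, if_true, Function.comp]
    apply List.filter_eq_self.2
    intro x hx
    rw [hfst bv hbv x hx, hc, hl]
    decide
  · have : (((G bv).length : Nat) == 1) = false := by simp [hl]
    simp only [this, if_neg, Bool.false_eq_true, not_false_iff, if_false, Function.comp]
    apply List.filter_eq_nil_iff.2
    intro x hx
    rw [hfst bv hbv x hx, hc]
    simp [hl]

theorem stageA (buyers sellers : List (String × List (Int × Int × Int))) :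
    (buyers.foldl (fun acc bv =>
      match (PySem.Dict.mk sellers).get? bv.1 with
      | none => bv.2.foldl (fun acc v => acc ++ [(bv.1, v.2.1, v.2.2)]) acc
      | some _ => bv.2.foldl (fun acc v => if v.1 == 1 then acc ++ [(bv.1, v.2.1, v.2.2)] else acc) acc)
      ([] : List (String × Int × Int)))
    = buyers.flatMap (fun bv => pvGroup sellers bv.1 bv.2) := by
  have hf : (fun (acc : List (String × Int × Int)) (bv : String × List (Int × Int × Int)) =>
      match (PySem.Dict.mk sellers).get? bv.1 with
      | none => bv.2.foldl (fun acc v => acc ++ [(bv.1, v.2.1, v.2.2)]) acc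
      | some _ => bv.2.foldl (fun acc v => if v.1 == 1 then acc ++ [(bv.1, v.2.1, v.2.2)] else acc) acc)
      = fun acc bv => acc ++ pvGroup sellers bv.1 bv.2 := by
    funext acc bv
    unfold pvGroup
    cases hg : (PySem.Dict.mk sellers).get? bv.1 with
    | none =>
        have hc : (PySem.Dict.mk sellers).contains bv.1 = false :=
          (PySem.Dict.get?_eq_none_iff_contains _ _).1 hg
        rw [PySem.List.foldl_append_singleton_eq_map, hc]
        simp
    | some w =>
        have hc : (PySem.Dict.mk sellers).contains bv.1 = true := by
          rw [PySem.Dict.contains_eq_isSome_get?, hg]; rfl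
        rw [PySem.List.foldl_append_if, hc]
        simp
  rw [hf, PySem.List.foldl_append_eq_flatMap]
  simp

theorem stageB (buyers sellers : List (String × List (Int × Int × Int))) :
    filter_transactions_alt buyers sellers
    = buyers.flatMap (fun bv => if (pvGroup sellers bv.1 bv.2).length == 1 then pvGroup sellers bv.1 bv.2 else []) := by
  show List.foldl (fun acc bv =>
      if (pvGroup sellers bv.1 bv.2).length == 1 then acc ++ pvGroup sellers bv.1 bv.2 else acc) [] buyers = _
  have hf : (fun (acc : List (String × Int × Int)) (bv : String × List (Int × Int × Int)) =>
      if (pvGroup sellers bv.1 bv.2).length == 1 then acc ++ pvGroup sellers bv.1 bv.2 else acc)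
      = fun acc bv => acc ++ (if (pvGroup sellers bv.1 bv.2).length == 1 then pvGroup sellers bv.1 bv.2 else []) := by
    funext acc bv
    split <;> simp
  rw [hf, PySem.List.foldl_append_eq_flatMap]
  simp

theorem main_eq (buyers sellers : List (String × List (Int × Int × Int))) (hnd : (buyers.map Prod.fst).Nodup) :
    filter_transactions buyers sellers = filter_transactions_alt buyers sellers := by
  simp only [filter_transactions]
  rw [stageA buyers sellers, stageB buyers sellers]
  have hmap : ∀ (l : List (String × Int × Int)), l.map (fun i => i.1) = l.map Prod.fst := by
    intro l; rfl
  simp only [hmap]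
  have hgd : (fun (i : String × Int × Int) =>
      (PySem.Dict.counter ((buyers.flatMap (fun bv => pvGroup sellers bv.1 bv.2)).map Prod.fst)).getD i.1 0 == 1)
      = fun i => ((((buyers.flatMap (fun bv => pvGroup sellers bv.1 bv.2)).map Prod.fst).count i.1 : Int) == 1) := by
    funext i
    rw [PySem.Dict.getD_counter]
  rw [hgd]
  exact filter_flatMap_count buyers _ (fun bv _ => pvGroup_fst sellers bv.1 bv.2) hnd

-- ===== VERDICT (by name: the statement is the Claim_ definition above) =====
theorem filter_transactions_spec : Claim_equal_filter_transactions := by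
  intro buyers sellers _ hpre
  exact main_eq buyers sellers hpre
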